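-- pv_equiv track=rewrite | github.com/LachlanGibson/LachlanGibson.github.io | blog/files/google-foobar-challenge/disorderlyescape.py | solution
-- ===== SOURCE A (Python) =====
-- from collections import Counter
-- from math import factorial
--
-- def solution(w, h, s):
--     """Returns the number of unique, non-equivalent configurations
--
--     The number of unique, non-equivalent configurations that can be found on a
--     grid w blocks wide and h blocks tall where each point has s possible
--     states. Equivalency is defined as above: any two grids with each point in
--     the same state where the actual order of the rows and columns do not matter
--     (and can thus be freely swapped around).
--
--     The symmetries of grids form a group. Specifically, the direct product of
--     two finite symmetric groups Sw x Sh. This is because grids are symmetric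
--     under row permutations and column permutations independently. A symmetric
--     group of degree n has an order of n!, so the order of Sw x Sh is w!h!.
--
--     The number of configurations is equivalent to the number of orbits in the
--     group Sw x Sh. This can be computed using Burnside's counting theorem.
--
--     = 1/w!h! * sum(s^(number of cycles in g)) for every g in Sw x Sh.
--
--     Therefore, the computation can be accelerated by combining the number of
--     permutations that share the same cycles.
--
--     Parameters
--     ----------
--     w : int
--         Grid width, [1,12].
--     h : int
--         Grid height, [1,12].
--     s : int
--         Number of allowed states, [2,20].
--
--     Returns
--     -------
--     config : str
--         Number of unique, non-equivalent configurations as a decimal string.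
--
--     """
--
--     def gcd(a, b):
--         # Euclidean algorithm finds the greatest common divisor of +ints a & b
--         while b != 0:
--             a, b = b, a % b
--         return a
--
--     def generate_cycle_lengths(n, m):
--         # returns a list of lists containing all combinations of cycle lengths
--         # in descending order that add to n without exceeding m.
--         h = min(n, m)
--         if h <= 0:
--             return [[]]
--         combinations = []
--         for l in range(h, 0, -1):
--             for c in generate_cycle_lengths(n - l, l):
--                 combinations.append([l] + c)
--         return combinations
--
--     def num_perms(cycle_counter, n):
--         # Number of permutations that contain the cycles in cycle_counter
--         num = factorial(n)
--         for length, ammount in cycle_counter.items():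
--             num = num // (length**ammount * factorial(ammount))
--         return num
--
--     config = 0
--     for w_combs in generate_cycle_lengths(w, w):
--         w_num = num_perms(Counter(w_combs), w)
--         for h_combs in generate_cycle_lengths(h, h):
--             h_num = num_perms(Counter(h_combs), h)
--             num_cycles = sum(sum(gcd(a, b) for a in h_combs) for b in w_combs)
--             config += w_num * h_num * s**num_cycles
--     config = config // (factorial(w) * factorial(h))
--     return str(config)
-- ===== SOURCE B (Python) =====
-- from math import factorial, gcd
--
--
-- def solution(w, h, s):
--     """Burnside count of non-equivalent w x h grids with s states, as a string.
--
--     Re-implementation: iterative stack-based integer-partition enumeration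
--     (instead of recursion), run-length-encoded cycle types (instead of
--     Counter), math.gcd, precomputed height cycle types, and a
--     multiplicity-weighted gcd sum for the cycle count.
--     """
--
--     def partitions(n):
--         # all partitions of n in descending-lex order, via an explicit DFS stack
--         out = []
--         stack = [([], n, n)]
--         while stack:
--             prefix, rem, cap = stack.pop()
--             c = min(rem, cap)
--             if c <= 0:
--                 out.append(prefix)
--             else:
--                 # pushed ascending, so popped (and explored) in descending order
--                 stack += [(prefix + [l], rem - l, l) for l in range(1, c + 1)]
--         return out
--
--     def cycle_type(p):
--         # run-length encoding of a descending partition: [(part, multiplicity), ...]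
--         if not p:
--             return []
--         rest = cycle_type(p[1:])
--         if rest and rest[0][0] == p[0]:
--             return [(p[0], rest[0][1] + 1)] + rest[1:]
--         return [(p[0], 1)] + rest
--
--     def class_size(runs, n):
--         # number of permutations of S_n with this cycle type
--         num = factorial(n)
--         for l, c in runs:
--             num = num // (l ** c * factorial(c))
--         return num
--
--     h_types = [(rt, class_size(rt, h))
--                for rt in (cycle_type(p) for p in partitions(h))]
--     config = 0
--     for p in partitions(w):
--         wt = cycle_type(p)
--         w_num = class_size(wt, w)
--         for ht, h_num in h_types:
--             num_cycles = 0
--             for lw, cw in wt: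
--                 for lh, ch in ht:
--                     num_cycles += cw * ch * gcd(lh, lw)
--             config += w_num * h_num * s ** num_cycles
--     return str(config // (factorial(w) * factorial(h)))
-- ===== Notes on version B (the rewrite author's own statement) =====
-- stated objective: alternative
-- what changed: The recursive partition enumerator is replaced by an explicit stack-based DFS generator, Counter cycle-types by run-length encoding of the descending partitions, the hand-written Euclid loop by math.gcd, the height cycle types and class sizes are computed once instead of once per width class, and the gcd double sum runs over distinct part lengths weighted by multiplicities instead of over all parts.
import Mathlib
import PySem

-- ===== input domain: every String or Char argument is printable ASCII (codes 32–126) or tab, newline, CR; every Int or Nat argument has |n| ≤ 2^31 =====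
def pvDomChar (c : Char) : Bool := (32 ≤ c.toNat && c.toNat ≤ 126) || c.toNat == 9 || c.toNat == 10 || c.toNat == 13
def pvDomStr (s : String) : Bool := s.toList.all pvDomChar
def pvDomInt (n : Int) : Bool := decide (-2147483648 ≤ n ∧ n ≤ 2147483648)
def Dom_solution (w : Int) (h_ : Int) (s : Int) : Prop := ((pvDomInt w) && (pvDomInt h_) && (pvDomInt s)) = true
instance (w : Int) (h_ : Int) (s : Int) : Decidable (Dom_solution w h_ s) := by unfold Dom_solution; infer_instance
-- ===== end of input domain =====

-- B replaces the recursive partition enumerator by an explicit stack DFS, Counter by run-length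
-- encoding, the hand-written Euclid loop by the library gcd, precomputes the height cycle types
-- once, and weights the gcd sum by multiplicities (equal return values everywhere on Pre_).

-- ===== PORT A =====

-- A's inner helper gcd(a, b): while b != 0: a, b = b, a % b.
-- (fuel = |b| + 1 only makes the loop total in Lean; it is never exhausted, |b| strictly decreases)
def pyGcdAux : Nat → Int → Int → Int
  | 0, a, _ => a
  | f + 1, a, b => if b = 0 then a else pyGcdAux f b (PySem.Int.mod a b)

def pyGcdA (a b : Int) : Int := pyGcdAux (b.natAbs + 1) a b

-- A's generate_cycle_lengths(n, m) (recursive; `for l in range(h,0,-1): for c in rec: append([l]+c)`).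
-- (fuel = n.toNat + 1 only makes the recursion total in Lean; it is never exhausted, n decreases by l ≥ 1)
def genAux : Nat → Int → Int → List (List Int)
  | 0, _, _ => [[]]
  | f + 1, n, m =>
    if min n m ≤ 0 then [[]]
    else
      (PySem.List.pyRange (min n m) 0 (-1)).foldl
        (fun combinations l =>
          (genAux f (n - l) l).foldl (fun cb c => cb ++ [l :: c]) combinations)
        []

def genA (n m : Int) : List (List Int) := genAux (n.toNat + 1) n m

-- A's num_perms(cycle_counter, n); factorial(k) is ported as k.toNat.factorial (exact for k ≥ 0,
-- the only values reaching it under Pre_)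
def numPermsA (d : PySem.Dict Int Int) (n : Int) : Int :=
  d.items.foldl
    (fun num lc => PySem.Int.floordiv num (lc.1 ^ lc.2.toNat * (lc.2.toNat.factorial : Int)))
    (n.toNat.factorial : Int)

-- s ** num_cycles is ported as s ^ num_cycles.toNat (exact: num_cycles is a sum of gcds of
-- positive integers, hence ≥ 0)
def solution (w : Int) (h_ : Int) (s : Int) : String :=
  let config : Int :=
    (genA w w).foldl
      (fun config wCombs =>
        let wNum := numPermsA (PySem.Dict.counter wCombs) w
        (genA h_ h_).foldl
          (fun config hCombs =>
            let hNum := numPermsA (PySem.Dict.counter hCombs) h_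
            let numCycles := (wCombs.map (fun b => (hCombs.map (fun a => pyGcdA a b)).sum)).sum
            config + wNum * hNum * s ^ numCycles.toNat)
          config)
      0
  PySem.Int.toStr (PySem.Int.floordiv config ((w.toNat.factorial : Int) * (h_.toNat.factorial : Int)))

-- ===== PORT B =====

-- B's partitions(n) while-loop: pop the last frame, emit or push child frames.
-- (fuel = Σ 2^rem + 1 over the stack only makes the loop total in Lean; it is never exhausted,
-- the sum strictly decreases at every iteration)
def runStackAux : Nat → List (List Int × Int × Int) → List (List Int) → List (List Int)
  | 0, _, out => out
  | f + 1, stack, out =>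
    if hne : stack = [] then out
    else
      if min (stack.getLast hne).2.1 (stack.getLast hne).2.2 ≤ 0 then
        runStackAux f stack.dropLast (out ++ [(stack.getLast hne).1])
      else
        runStackAux f
          (stack.dropLast ++
            (PySem.List.pyRange 1 (min (stack.getLast hne).2.1 (stack.getLast hne).2.2 + 1) 1).map
              (fun l => ((stack.getLast hne).1 ++ [l], (stack.getLast hne).2.1 - l, l)))
          out

def runStackB (stack : List (List Int × Int × Int)) (out : List (List Int)) : List (List Int) :=
  runStackAux ((stack.map (fun fr => 2 ^ fr.2.1.toNat)).sum + 1) stack out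

def partsB (n : Int) : List (List Int) := runStackB [([], n, n)] []

-- B's cycle_type(p): recursive run-length encoding
def rleB : List Int → List (Int × Int)
  | [] => []
  | x :: xs =>
    match rleB xs with
    | [] => [(x, 1)]
    | (y, c) :: rest => if y = x then (x, c + 1) :: rest else (x, 1) :: (y, c) :: rest

-- B's class_size(runs, n)
def classSizeB (runs : List (Int × Int)) (n : Int) : Int :=
  runs.foldl
    (fun num lc => PySem.Int.floordiv num (lc.1 ^ lc.2.toNat * (lc.2.toNat.factorial : Int)))
    (n.toNat.factorial : Int)

-- math.gcd is ported as Int.gcd; s ** num_cycles as s ^ num_cycles.toNat (num_cycles ≥ 0)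
def solution_alt (w : Int) (h_ : Int) (s : Int) : String :=
  let hTypes := (partsB h_).map (fun p => let rt := rleB p; (rt, classSizeB rt h_))
  let config : Int :=
    (partsB w).foldl
      (fun config p =>
        let wt := rleB p
        let wNum := classSizeB wt w
        hTypes.foldl
          (fun config ht =>
            let numCycles :=
              wt.foldl
                (fun nc lw =>
                  ht.1.foldl (fun nc lh => nc + lw.2 * lh.2 * (Int.gcd lh.1 lw.1 : Int)) nc)
                0
            config + wNum * ht.2 * s ^ numCycles.toNat)
          config)
      0
  PySem.Int.toStr (PySem.Int.floordiv config ((w.toNat.factorial : Int) * (h_.toNat.factorial : Int)))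

-- ===== PRECONDITION & SPEC =====
-- Pre_ excludes exactly the inputs where A raises: for w < 0 or h < 0 math.factorial raises ValueError.
def Pre_solution (w : Int) (h_ : Int) (s : Int) : Prop := 0 ≤ w ∧ 0 ≤ h_
instance (w : Int) (h_ : Int) (s : Int) : Decidable (Pre_solution w h_ s) := by
  unfold Pre_solution; infer_instance

def pvWitness_solution : Int × Int × Int := (3, 3, 5)

def Spec_solution (w : Int) (h_ : Int) (s : Int) (out : String) : Prop := out = solution_alt w h_ s
instance (w : Int) (h_ : Int) (s : Int) (out : String) : Decidable (Spec_solution w h_ s out) := by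
  unfold Spec_solution; infer_instance

-- ===== CLAIM (what is proved, stated in full; the proofs are below) =====
def Claim_equal_solution : Prop := ∀ (w : Int) (h_ : Int) (s : Int), Dom_solution w h_ s → Pre_solution w h_ s → Spec_solution w h_ s (solution w h_ s)

-- ===== LEMMAS AND PROOFS =====

theorem genAux_fuel : ∀ (f f' : Nat) (n m : Int), n.toNat < f → n.toNat < f' →
    genAux f n m = genAux f' n m := by
  intro f
  induction f with
  | zero => intro f' n m h; omega
  | succ f ih =>
    intro f' n m hf hf'
    rcases f' with _ | f'
    · omega
    · rw [genAux, genAux]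
      split_ifs with h0
      · rfl
      · apply PySem.List.foldl_congr_mem'
        intro l hl acc
        have hlb := PySem.List.mem_pyRange_neg_one.mp hl
        rw [ih f' (n - l) l (by omega) (by omega)]

theorem genA_eq (n m : Int) :
    genA n m = if min n m ≤ 0 then [[]]
      else (PySem.List.pyRange (min n m) 0 (-1)).flatMap
        (fun l => (genA (n - l) l).map (l :: ·)) := by
  rw [genA, genAux]
  split_ifs with h0
  · rfl
  · simp only [PySem.List.foldl_append_singleton_eq_map]
    have hstep : ∀ l ∈ PySem.List.pyRange (min n m) 0 (-1), ∀ acc : List (List Int),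
        acc ++ (genAux n.toNat (n - l) l).map (l :: ·) =
          acc ++ (genA (n - l) l).map (l :: ·) := by
      intro l hl acc
      have hlb := PySem.List.mem_pyRange_neg_one.mp hl
      rw [genA, genAux_fuel n.toNat ((n - l).toNat + 1) (n - l) l (by omega) (by omega)]
    rw [PySem.List.foldl_congr_mem' _ _ _ _ hstep]
    simp only [PySem.List.foldl_append_eq_flatMap, List.nil_append]

theorem mem_genA {n m : Int} {p : List Int} (hp : p ∈ genA n m) :
    p.Pairwise (fun a b => b ≤ a) ∧ ∀ x ∈ p, 1 ≤ x ∧ x ≤ m := by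
  have H : ∀ (N : Nat) (n m : Int), n.toNat = N → ∀ p ∈ genA n m,
      p.Pairwise (fun a b => b ≤ a) ∧ ∀ x ∈ p, 1 ≤ x ∧ x ≤ m := by
    intro N
    induction N using Nat.strong_induction_on with
    | _ N ih =>
      intro n m hN p hp
      rw [genA_eq] at hp
      split_ifs at hp with h0
      · simp at hp
        subst hp
        simp
      · rw [List.mem_flatMap] at hp
        obtain ⟨l, hl, hpl⟩ := hp
        have hlb := PySem.List.mem_pyRange_neg_one.mp hl
        rw [List.mem_map] at hpl
        obtain ⟨c, hc, rfl⟩ := hpl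
        have hrec := ih (n - l).toNat (by omega) (n - l) l rfl c hc
        constructor
        · exact List.pairwise_cons.mpr ⟨fun y hy => (hrec.2 y hy).2, hrec.1⟩
        · intro x hx
          rcases List.mem_cons.mp hx with rfl | hx
          · omega
          · have := hrec.2 x hx
            omega
  exact H n.toNat n m rfl p hp

theorem pyGcdA_eq_gcd (a b : Int) (ha : 0 ≤ a) (hb : 0 ≤ b) :
    pyGcdA a b = (Int.gcd a b : Int) := by
  have H : ∀ (f : Nat) (b a : Int), b.natAbs < f → 0 ≤ a → 0 ≤ b →
      pyGcdAux f a b = (Int.gcd a b : Int) := by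
    intro f
    induction f with
    | zero => intro b a h; omega
    | succ f ih =>
      intro b a hf ha hb
      rw [pyGcdAux]
      split_ifs with h
      · subst h
        simp [Int.gcd, Int.natAbs_of_nonneg ha]
      · have hbpos : 0 < b := lt_of_le_of_ne hb (Ne.symm h)
        have hmod_eq : PySem.Int.mod a b = a % b := PySem.Int.mod_eq_emod_of_pos hbpos
        have h1 : 0 ≤ a % b := Int.emod_nonneg a h
        have h2 : a % b < b := Int.emod_lt_of_pos a hbpos
        rw [hmod_eq, ih (a % b) b (by omega) hb h1]
        rw [Int.gcd_comm b (a % b), Int.gcd_emod, Int.gcd_comm]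
  exact H (b.natAbs + 1) b a (by omega) ha hb

theorem rleB_cons_of_nil {xs : List Int} (x : Int) (h : rleB xs = []) :
    rleB (x :: xs) = [(x, 1)] := by
  rw [rleB, h]

theorem rleB_cons_of_cons {xs : List Int} {y c : Int} {rest : List (Int × Int)} (x : Int)
    (h : rleB xs = (y, c) :: rest) :
    rleB (x :: xs) = if y = x then (x, c + 1) :: rest else (x, 1) :: (y, c) :: rest := by
  rw [rleB, h]

theorem rleB_pos {p : List Int} : ∀ vc ∈ rleB p, 1 ≤ vc.2 := by
  induction p with
  | nil => simp [rleB]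
  | cons x xs ih =>
    intro vc hvc
    rcases h : rleB xs with _ | ⟨⟨y, c⟩, rest⟩
    · rw [rleB_cons_of_nil x h] at hvc
      simp at hvc
      simp [hvc]
    · rw [rleB_cons_of_cons x h] at hvc
      rw [h] at ih
      split_ifs at hvc with hyx
      · rcases List.mem_cons.mp hvc with h1 | h1
        · have := ih (y, c) (by simp)
          simp at this
          subst h1
          simp
          omega
        · exact ih vc (by simp [h1])
      · rcases List.mem_cons.mp hvc with h1 | h1
        · subst h1; simp
        · exact ih vc h1

theorem rleB_key_mem {p : List Int} : ∀ vc ∈ rleB p, vc.1 ∈ p := by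
  induction p with
  | nil => simp [rleB]
  | cons x xs ih =>
    intro vc hvc
    rcases h : rleB xs with _ | ⟨⟨y, c⟩, rest⟩
    · rw [rleB_cons_of_nil x h] at hvc
      simp at hvc
      simp [hvc]
    · rw [rleB_cons_of_cons x h] at hvc
      rw [h] at ih
      split_ifs at hvc with hyx
      · rcases List.mem_cons.mp hvc with h1 | h1
        · subst h1; simp
        · exact List.mem_cons_of_mem x (ih vc (by simp [h1]))
      · rcases List.mem_cons.mp hvc with h1 | h1
        · subst h1; simp
        · exact List.mem_cons_of_mem x (ih vc h1)

theorem rleB_cons_head (x : Int) (xs : List Int) :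
    ∃ c rest, rleB (x :: xs) = (x, c) :: rest := by
  rcases h : rleB xs with _ | ⟨⟨y, c⟩, rest⟩
  · exact ⟨1, [], rleB_cons_of_nil x h⟩
  · rw [rleB_cons_of_cons x h]
    split_ifs with hyx
    · exact ⟨c + 1, rest, rfl⟩
    · exact ⟨1, (y, c) :: rest, rfl⟩

theorem rleB_flat (p : List Int) :
    (rleB p).flatMap (fun vc => List.replicate vc.2.toNat vc.1) = p := by
  induction p with
  | nil => simp [rleB]
  | cons x xs ih =>
    rcases h : rleB xs with _ | ⟨⟨y, c⟩, rest⟩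
    · rw [rleB_cons_of_nil x h]
      rw [h] at ih
      simp at ih
      simp [← ih]
    · rw [rleB_cons_of_cons x h]
      have hc : 1 ≤ c := by
        have := rleB_pos (p := xs) (y, c) (by simp [h])
        simpa using this
      rw [h] at ih
      split_ifs with hyx
      · subst hyx
        simp only [List.flatMap_cons] at ih ⊢
        have : (c + 1).toNat = c.toNat + 1 := by omega
        rw [this, List.replicate_succ, List.cons_append, ih]
      · simp only [List.flatMap_cons] at ih ⊢
        have : (1 : Int).toNat = 1 := by omega
        rw [this, List.replicate_one, List.cons_append, List.nil_append, ih]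

theorem rleB_sum (p : List Int) (f : Int → Int) :
    (p.map f).sum = ((rleB p).map (fun vc => vc.2 * f vc.1)).sum := by
  have gen : ∀ l : List (Int × Int), (∀ vc ∈ l, 0 ≤ vc.2) →
      ((l.flatMap (fun vc => List.replicate vc.2.toNat vc.1)).map f).sum =
        (l.map (fun vc => vc.2 * f vc.1)).sum := by
    intro l
    induction l with
    | nil => simp
    | cons vc l ih =>
      intro hpos
      simp only [List.flatMap_cons, List.map_append, List.sum_append, List.map_cons,
        List.sum_cons, List.map_replicate, List.sum_replicate]
      rw [ih (fun vc h => hpos vc (List.mem_cons_of_mem _ h))]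
      have h0 : 0 ≤ vc.2 := hpos vc (by simp)
      have : (vc.2.toNat : Int) = vc.2 := Int.toNat_of_nonneg h0
      rw [nsmul_eq_mul, this]
  conv_lhs => rw [← rleB_flat p]
  exact gen (rleB p) (fun vc h => by have := rleB_pos vc h; omega)


theorem set_add_cons {y x : Int} (s : List Int) (hxy : y ≠ x) :
    PySem.Set.add (x :: s) y = x :: PySem.Set.add s y := by
  simp [PySem.Set.add, PySem.Set.contains, hxy]
  split_ifs <;> simp

theorem set_update_cons (s : List Int) (y : Int) (q : List Int) :
    PySem.Set.update s (y :: q) = PySem.Set.update (PySem.Set.add s y) q := rfl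

theorem set_ofList_cons (x : Int) (xs : List Int) :
    PySem.Set.ofList (x :: xs) = PySem.Set.update [x] xs := rfl

theorem set_update_cons_not_mem : ∀ (q : List Int) (x : Int) (s : List Int), x ∉ q →
    PySem.Set.update (x :: s) q = x :: PySem.Set.update s q := by
  intro q
  induction q with
  | nil => intro x s _; rfl
  | cons y q ih =>
    intro x s hx
    have hxy : y ≠ x := fun h => hx (by simp [h])
    rw [set_update_cons, set_update_cons, set_add_cons s hxy]
    exact ih x _ (fun h => hx (by simp [h]))

theorem set_update_prefix : ∀ (q s : List Int), ∃ t, PySem.Set.update s q = s ++ t := by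
  intro q
  induction q with
  | nil =>
    intro s
    have h0 : PySem.Set.update s [] = s := rfl
    exact ⟨[], by rw [h0, List.append_nil]⟩
  | cons y q ih =>
    intro s
    obtain ⟨t, ht⟩ := ih (PySem.Set.add s y)
    by_cases hc : PySem.Set.contains s y
    · have hmem : y ∈ s := by
        have := hc
        simp [PySem.Set.contains] at this
        exact this
      have hadd : PySem.Set.add s y = s := by simp [PySem.Set.add, PySem.Set.contains, hmem]
      exact ⟨t, by rw [set_update_cons, ht, hadd]⟩
    · have hadd : PySem.Set.add s y = s ++ [y] := by
        simp only [PySem.Set.add, hc]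
        simp
      exact ⟨[y] ++ t, by rw [set_update_cons, ht, hadd, List.append_assoc]⟩

theorem counter_items_eq_rleB {p : List Int} (hs : p.Pairwise (fun a b => b ≤ a)) :
    (PySem.Dict.counter p).items = rleB p := by
  induction p with
  | nil => rfl
  | cons x xs ih =>
    obtain ⟨hx, hxs⟩ := List.pairwise_cons.mp hs
    have ihx := ih hxs
    rw [PySem.Dict.items_counter] at ihx ⊢
    by_cases hmem : x ∈ xs
    · rcases xs with _ | ⟨z, zs⟩
      · simp at hmem
      have hzx : z = x := by
        rcases List.mem_cons.mp hmem with h1 | h1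
        · omega
        · have h2 : x ≤ z := (List.pairwise_cons.mp hxs).1 x h1
          have h3 : z ≤ x := hx z (by simp)
          omega
      subst hzx
      obtain ⟨c, rest, hr⟩ := rleB_cons_head z zs
      rw [hr] at ihx
      rw [rleB_cons_of_cons z hr, if_pos rfl]
      have hof : PySem.Set.ofList (z :: z :: zs) = PySem.Set.ofList (z :: zs) := by
        rw [set_ofList_cons, set_update_cons]
        have : PySem.Set.add [z] z = [z] := by
          simp [PySem.Set.add, PySem.Set.contains]
        rw [this]
        rfl
      rw [hof]
      obtain ⟨t, ht⟩ := set_update_prefix zs [z]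
      have hofzs : PySem.Set.ofList (z :: zs) = z :: t := by
        rw [set_ofList_cons, ht]; rfl
      have hnd : (z :: t).Nodup := by
        rw [← hofzs]; exact PySem.Set.nodup_ofList _
      have hznt : z ∉ t := (List.nodup_cons.mp hnd).1
      rw [hofzs] at ihx ⊢
      rw [List.map_cons] at ihx ⊢
      have ih1 := List.cons_eq_cons.mp ihx
      have hcnt : ((z :: zs).count z : Int) = c := congrArg Prod.snd ih1.1
      refine List.cons_eq_cons.mpr ⟨?_, ?_⟩
      · have hstep : (z :: z :: zs).count z = (z :: zs).count z + 1 := by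
          simp
        have hv : (((z :: z :: zs).count z : Nat) : Int) = c + 1 := by
          rw [hstep]
          push_cast
          omega
        rw [Prod.mk.injEq]
        exact ⟨rfl, hv⟩
      · rw [← ih1.2]
        apply List.map_congr_left
        intro k hk
        have hkz : k ≠ z := fun h => hznt (h ▸ hk)
        have : (z :: z :: zs).count k = (z :: zs).count k := by
          simp [List.count_cons]
          omega
        rw [this]
    · rcases hnil : rleB xs with _ | ⟨⟨y, c⟩, rest⟩
      · have hxsnil : xs = [] := by
          rcases xs with _ | ⟨a, as⟩
          · rfl
          · obtain ⟨c', rest', hr'⟩ := rleB_cons_head a as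
            rw [hr'] at hnil
            exact absurd hnil (by simp)
        subst hxsnil
        rw [rleB_cons_of_nil x hnil]
        have : PySem.Set.ofList [x] = [x] := rfl
        rw [this]
        simp
      · have hy : y ∈ xs := rleB_key_mem (y, c) (by rw [hnil]; simp)
        have hyx : y ≠ x := fun h => hmem (h ▸ hy)
        rw [rleB_cons_of_cons x hnil, if_neg hyx]
        have hof2 : PySem.Set.ofList (x :: xs) = x :: PySem.Set.ofList xs := by
          rw [set_ofList_cons]
          have := set_update_cons_not_mem xs x [] hmem
          rw [this]
          rfl
        rw [hof2, List.map_cons]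
        refine List.cons_eq_cons.mpr ⟨?_, ?_⟩
        · have h0 : xs.count x = 0 := List.count_eq_zero.mpr hmem
          have hv : (((x :: xs).count x : Nat) : Int) = 1 := by
            simp [h0]
          rw [Prod.mk.injEq]
          exact ⟨rfl, hv⟩
        · rw [← hnil, ← ihx]
          apply List.map_congr_left
          intro k hk
          have hkx : k ≠ x := by
            have : k ∈ xs := (PySem.Set.mem_ofList _ _).mp hk
            exact fun h => hmem (h ▸ this)
          simp [List.count_cons]
          omega

theorem pvPow2SumLt (c R : Nat) (hcR : c ≤ R) :
    ((List.range c).map (fun k => 2 ^ (R - 1 - k))).sum < 2 ^ R := by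
  have key : ∀ c R : Nat, c ≤ R →
      ((List.range c).map (fun k => 2 ^ (R - 1 - k))).sum ≤ 2 ^ R - 2 ^ (R - c) := by
    intro c
    induction c with
    | zero => intro R _; simp
    | succ c ih =>
      intro R hR
      rw [List.range_succ, List.map_append, List.sum_append]
      have h1 := ih R (by omega)
      have h2 : 2 ^ (R - c) = 2 * 2 ^ (R - (c + 1)) := by
        rw [← pow_succ']
        congr 1
        omega
      simp only [List.map_cons, List.map_nil, List.sum_cons, List.sum_nil]
      have h3 : (2 : Nat) ^ (R - 1 - c) = 2 ^ (R - (c + 1)) := by congr 1; omega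
      have h4 : (2 : Nat) ^ (R - c) ≤ 2 ^ R := Nat.pow_le_pow_right (by omega) (by omega)
      omega
  have h1 := key c R hcR
  have h2 : 0 < 2 ^ (R - c) := Nat.pow_pos (by omega)
  have h3 : (2 : Nat) ^ (R - c) ≤ 2 ^ R := Nat.pow_le_pow_right (by omega) (by omega)
  omega

theorem runStackAux_spec : ∀ (f : Nat) (stack : List (List Int × Int × Int))
    (out : List (List Int)), (stack.map (fun fr => 2 ^ fr.2.1.toNat)).sum < f →
    runStackAux f stack out =
      out ++ stack.reverse.flatMap (fun fr => (genA fr.2.1 fr.2.2).map (fr.1 ++ ·)) := by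
  intro f
  induction f with
  | zero => intro stack out h; omega
  | succ f ih =>
    intro stack out hf
    rw [runStackAux]
    split_ifs with hne hle
    · subst hne
      simp
    · have hsplit : stack = stack.dropLast ++ [stack.getLast hne] :=
        (List.dropLast_append_getLast hne).symm
      have hmu : (stack.map (fun fr => 2 ^ fr.2.1.toNat)).sum =
          (stack.dropLast.map (fun fr => 2 ^ fr.2.1.toNat)).sum +
            2 ^ (stack.getLast hne).2.1.toNat := by
        conv_lhs => rw [hsplit]
        simp
      have hpos : 0 < 2 ^ (stack.getLast hne).2.1.toNat := Nat.pow_pos (by omega)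
      rw [ih _ _ (by omega)]
      conv_rhs => rw [hsplit]
      rw [List.reverse_append, List.reverse_singleton, List.flatMap_append,
        List.flatMap_singleton]
      rw [genA_eq, if_pos hle]
      simp [List.append_assoc]
    · have hsplit : stack = stack.dropLast ++ [stack.getLast hne] :=
        (List.dropLast_append_getLast hne).symm
      have hmu : (stack.map (fun fr => 2 ^ fr.2.1.toNat)).sum =
          (stack.dropLast.map (fun fr => 2 ^ fr.2.1.toNat)).sum +
            2 ^ (stack.getLast hne).2.1.toNat := by
        conv_lhs => rw [hsplit]
        simp
      have hrpos : 0 < (stack.getLast hne).2.1 := by omega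
      have hbnd :
          (((PySem.List.pyRange 1
            (min (stack.getLast hne).2.1 (stack.getLast hne).2.2 + 1) 1).map
            (fun l => ((stack.getLast hne).1 ++ [l], (stack.getLast hne).2.1 - l, l))).map
              (fun fr => 2 ^ fr.2.1.toNat)).sum < 2 ^ (stack.getLast hne).2.1.toNat := by
        rw [List.map_map, PySem.List.pyRange_one, List.map_map]
        have heq : ((List.range
            (min (stack.getLast hne).2.1 (stack.getLast hne).2.2 + 1 - 1).toNat).map
            (((fun fr : List Int × Int × Int => 2 ^ fr.2.1.toNat) ∘
              (fun l => ((stack.getLast hne).1 ++ [l], (stack.getLast hne).2.1 - l, l))) ∘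
                (fun k : Nat => 1 + (k : Int)))) =
            ((List.range (min (stack.getLast hne).2.1 (stack.getLast hne).2.2).toNat).map
              (fun k => 2 ^ ((stack.getLast hne).2.1.toNat - 1 - k))) := by
          have hn : (min (stack.getLast hne).2.1 (stack.getLast hne).2.2 + 1 - 1).toNat =
              (min (stack.getLast hne).2.1 (stack.getLast hne).2.2).toNat := by omega
          rw [hn]
          apply List.map_congr_left
          intro k hk
          simp only [List.mem_range] at hk
          simp only [Function.comp]
          congr 1
          omega
        rw [heq]
        exact pvPow2SumLt _ _ (by omega)
      rw [ih _ _ (by rw [List.map_append, List.sum_append]; omega)]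
      conv_rhs => rw [hsplit]
      rw [List.reverse_append, List.reverse_append, List.reverse_singleton,
        List.flatMap_append, List.flatMap_append, List.flatMap_singleton]
      rw [genA_eq, if_neg hle]
      congr 1
      congr 1
      rw [← List.map_reverse]
      have hrev := (PySem.List.pyRange_neg_one_eq_reverse
        (min (stack.getLast hne).2.1 (stack.getLast hne).2.2) 0).symm
      norm_num at hrev
      rw [hrev]
      rw [List.flatMap_map, List.map_flatMap]
      congr 1
      funext l
      simp only [List.map_map]
      apply List.map_congr_left
      intro x _
      simp only [Function.comp_apply]
      rw [← List.append_cons]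

theorem partsB_eq (n : Int) : partsB n = genA n n := by
  rw [partsB, runStackB, runStackAux_spec _ _ _ (by simp)]
  simp

theorem weights_eq {p : List Int} (hs : p.Pairwise (fun a b => b ≤ a)) (n : Int) :
    numPermsA (PySem.Dict.counter p) n = classSizeB (rleB p) n := by
  unfold numPermsA classSizeB
  rw [counter_items_eq_rleB hs]

theorem numCycles_eq {p q : List Int}
    (hp : ∀ x ∈ p, 1 ≤ x) (hq : ∀ x ∈ q, 1 ≤ x) :
    (p.map (fun b => (q.map (fun a => pyGcdA a b)).sum)).sum =
      (rleB p).foldl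
        (fun nc lw => (rleB q).foldl
          (fun nc lh => nc + lw.2 * lh.2 * (Int.gcd lh.1 lw.1 : Int)) nc) 0 := by
  simp only [PySem.List.foldl_add, zero_add]
  have step1 : ∀ b ∈ p, (q.map (fun a => pyGcdA a b)).sum =
      (q.map (fun a => (Int.gcd a b : Int))).sum := by
    intro b hb
    congr 1
    apply List.map_congr_left
    intro a ha
    exact pyGcdA_eq_gcd a b (by have := hq a ha; omega) (by have := hp b hb; omega)
  rw [List.map_congr_left step1]
  rw [rleB_sum p (fun b => (q.map (fun a => (Int.gcd a b : Int))).sum)]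
  apply congrArg
  apply List.map_congr_left
  intro lw _
  rw [rleB_sum q (fun a => (Int.gcd a lw.1 : Int))]
  rw [← List.sum_map_mul_left]
  apply congrArg
  apply List.map_congr_left
  intro lh _
  ring

-- ===== VERDICT (by name: the statement is the Claim_ definition above) =====
theorem solution_spec : Claim_equal_solution := by
  unfold Claim_equal_solution
  intro w h_ s _ _
  unfold Spec_solution solution solution_alt
  simp only [partsB_eq, List.foldl_map]
  congr 2
  apply PySem.List.foldl_congr_mem'
  intro p hp acc
  obtain ⟨hsort, hbnd⟩ := mem_genA hp
  apply PySem.List.foldl_congr_mem'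
  intro q hq acc2
  obtain ⟨hsortq, hbndq⟩ := mem_genA hq
  rw [weights_eq hsort, weights_eq hsortq,
    numCycles_eq (fun x hx => (hbnd x hx).1) (fun x hx => (hbndq x hx).1)]
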